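-- pv_equiv track=rewrite | github.com/Erfanaf1/ForkForce | ForkForce.py | power_if_prime
-- ===== SOURCE A (Python) =====
-- def power_if_prime(n):
--
--     count = 0
--     for i in range(1, n+1):
--         if n % i == 0:
--             count += 1
--     if count == 2:
--         return n ** 2
--     else:
--         return n
-- ===== SOURCE B (Python) =====
-- def power_if_prime(n):
--     # Trial division up to sqrt(n) instead of counting all divisors of n.
--     if n < 2:
--         return n
--     if n % 2 == 0:
--         return 4 if n == 2 else n
--     i = 3
--     while i * i <= n:
--         if n % i == 0:
--             return n
--         i += 2
--     return n * n
-- ===== Notes on version B (the rewrite author's own statement) =====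
-- stated objective: faster
-- what changed: A counts all divisors of n by scanning the full range up to n and squares n iff the count is two; B decides primality by trial division of odd candidates up to the square root, after dispatching small and even inputs directly.
import Mathlib
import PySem

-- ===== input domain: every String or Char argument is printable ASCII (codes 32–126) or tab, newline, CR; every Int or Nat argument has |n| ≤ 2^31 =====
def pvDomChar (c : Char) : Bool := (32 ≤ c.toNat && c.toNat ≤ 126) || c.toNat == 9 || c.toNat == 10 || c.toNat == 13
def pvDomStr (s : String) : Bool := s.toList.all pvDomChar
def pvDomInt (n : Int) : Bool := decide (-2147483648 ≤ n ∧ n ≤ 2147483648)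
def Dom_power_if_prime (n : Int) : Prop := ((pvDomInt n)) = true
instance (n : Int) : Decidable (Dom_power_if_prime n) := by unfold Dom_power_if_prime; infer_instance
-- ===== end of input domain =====

-- B replaces A's count of ALL divisors 1..n by trial division up to sqrt(n) (odd candidates only).

-- ===== PORT A =====
-- literal port of A: count the divisors of n among 1..n, square n iff the count is 2
def power_if_prime (n : Int) : Int :=
  let count : Int := (PySem.List.pyRange 1 (n+1) 1).foldl
    (fun count i => if PySem.Int.mod n i == 0 then count + 1 else count) 0
  if count == 2 then n ^ 2 else n

-- ===== PORT B =====
-- B's trial-division loop: i runs over odd candidates 3,5,… while i*i ≤ n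
-- (fuel only makes the while-loop total; it is chosen large enough never to run out)
def pipTrial (fuel : Nat) (n : Int) (i : Int) : Int :=
  match fuel with
  | 0 => n * n
  | fuel + 1 =>
    if i * i ≤ n then
      if PySem.Int.mod n i == 0 then n
      else pipTrial fuel n (i + 2)
    else n * n

def power_if_prime_alt (n : Int) : Int :=
  if n < 2 then n
  else if PySem.Int.mod n 2 == 0 then (if n == 2 then 4 else n)
  else pipTrial n.toNat n 3

-- ===== PRECONDITION & SPEC =====
def Spec_power_if_prime (n : Int) (out : Int) : Prop := out = power_if_prime_alt n
instance (n : Int) (out : Int) : Decidable (Spec_power_if_prime n out) := by unfold Spec_power_if_prime; infer_instance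

-- ===== CLAIM (what is proved, stated in full; the proofs are below) =====
def Claim_equal_power_if_prime : Prop := ∀ (n : Int), Dom_power_if_prime n → Spec_power_if_prime n (power_if_prime n)

-- ===== LEMMAS AND PROOFS =====

-- A's fold counts the i in the list that divide n
theorem pip_foldl_count (n : Int) (l : List Int) (c : Int) :
    l.foldl (fun count i => if PySem.Int.mod n i == 0 then count + 1 else count) c
      = c + l.countP (fun i => decide (i ∣ n)) := by
  induction l generalizing c with
  | nil => simp
  | cons x xs ih =>
    simp only [List.foldl_cons, List.countP_cons, ih]
    by_cases h : x ∣ n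
    · rw [if_pos (by simp [PySem.Int.mod_eq_zero_iff_dvd, h]), if_pos (by simpa)]
      push_cast; ring
    · rw [if_neg (by simp [PySem.Int.mod_eq_zero_iff_dvd, h]), if_neg (by simpa)]
      simp

-- a number ≥ 2 is prime iff it has exactly two divisors
theorem card_divisors_eq_two_iff {m : ℕ} (hm : 2 ≤ m) : m.divisors.card = 2 ↔ m.Prime := by
  constructor
  · intro h
    by_contra hp
    obtain ⟨d, hd, hd2, hdm⟩ := Nat.exists_dvd_of_not_prime2 hm hp
    have h1 : (1 : ℕ) ∈ m.divisors := Nat.one_mem_divisors.mpr (by omega)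
    have h2 : d ∈ m.divisors := Nat.mem_divisors.mpr ⟨hd, by omega⟩
    have h3 : m ∈ m.divisors := Nat.mem_divisors.mpr ⟨dvd_refl m, by omega⟩
    have hsub : ({1, d, m} : Finset ℕ) ⊆ m.divisors := by
      intro x hx
      simp only [Finset.mem_insert, Finset.mem_singleton] at hx
      rcases hx with rfl | rfl | rfl <;> assumption
    have hc3 : ({1, d, m} : Finset ℕ).card = 3 := by
      rw [Finset.card_insert_of_notMem (by simp; omega),
          Finset.card_insert_of_notMem (by simp; omega), Finset.card_singleton]
    have := Finset.card_le_card hsub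
    omega
  · intro hp
    rw [hp.divisors,
        Finset.card_insert_of_notMem (by simp [(Nat.Prime.one_lt hp).ne]),
        Finset.card_singleton]

-- the divisor count of A, expressed over Nat, equals the cardinality of divisors
theorem pip_countP_eq_card (m : ℕ) (hm : 1 ≤ m) :
    (List.range m).countP (fun k => decide ((1 + k) ∣ m)) = m.divisors.card := by
  have h1 : (List.range m).countP (fun k => decide ((1 + k) ∣ m))
      = ((Finset.range m).filter (fun k => (1 + k) ∣ m)).card := by
    simp [Finset.range, Finset.filter, Finset.card, Multiset.range,
      List.countP_eq_length_filter, Multiset.filter_coe]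
  rw [h1]
  apply Finset.card_bij (fun k _ => 1 + k)
  · intro k hk
    simp only [Finset.mem_filter, Finset.mem_range] at hk
    exact Nat.mem_divisors.mpr ⟨hk.2, by omega⟩
  · intro a ha b hb hab; omega
  · intro d hd
    have hd' := Nat.mem_divisors.mp hd
    have hd1 : 1 ≤ d := Nat.one_le_iff_ne_zero.mpr fun h => by
      subst h; exact hd'.2 (Nat.eq_zero_of_zero_dvd hd'.1)
    have hdm : d ≤ m := Nat.le_of_dvd (by omega) hd'.1
    exact ⟨d - 1, by simp only [Finset.mem_filter, Finset.mem_range]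
                     constructor; omega
                     have : 1 + (d - 1) = d := by omega
                     rw [this]; exact hd'.1, by omega⟩

-- A's value, characterised by primality of n
theorem power_if_prime_eq (n : Int) :
    power_if_prime n = if 2 ≤ n ∧ n.toNat.Prime then n ^ 2 else n := by
  unfold power_if_prime
  by_cases hn : n ≤ 0
  · rw [PySem.List.pyRange_one_eq_nil (by omega)]
    simp only [List.foldl_nil]
    rw [if_neg (by decide), if_neg (by omega)]
  · have hn : 0 < n := by omega
    rw [pip_foldl_count]
    rw [PySem.List.pyRange_one]
    rw [List.countP_map]
    have hmn : ((n.toNat : Int)) = n := by omega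
    have hcast : ∀ k : ℕ, ((fun i => decide (i ∣ n)) ∘ fun k : ℕ => 1 + (k : Int)) k
        = (fun k : ℕ => decide ((1 + k) ∣ n.toNat)) k := by
      intro k
      simp only [Function.comp]
      congr 1
      rw [← hmn]
      rw [show (1 : Int) + (k : Int) = ((1 + k : ℕ) : Int) by push_cast; ring]
      exact propext Int.natCast_dvd_natCast
    rw [List.countP_congr (fun x _ => by rw [hcast x])]
    have hrange : (n + 1 - 1).toNat = n.toNat := by omega
    rw [hrange]
    by_cases hp : 2 ≤ n ∧ n.toNat.Prime
    · rw [if_pos hp]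
      have := (card_divisors_eq_two_iff (by omega : 2 ≤ n.toNat)).mpr hp.2
      rw [pip_countP_eq_card n.toNat (by omega), this]
      simp
    · rw [if_neg hp]
      rcases eq_or_lt_of_le (show 1 ≤ n by omega) with h1 | h2
      · have : n.toNat = 1 := by omega
        rw [this]
        norm_num [List.range_succ]
      · have hnp : ¬ n.toNat.Prime := fun h => hp ⟨by omega, h⟩
        have hcard := pip_countP_eq_card n.toNat (by omega)
        have : n.toNat.divisors.card ≠ 2 := fun h =>
          hnp ((card_divisors_eq_two_iff (by omega)).mp h)
        rw [if_neg (by rw [hcard]; simpa using fun h => this (by exact_mod_cast h))]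

-- if no candidate below i divides n and i*i > n, then n is prime
theorem pip_prime (n i : Int) (hn : 3 ≤ n) (hi : 3 ≤ i) (h : ¬ i * i ≤ n)
    (H : ∀ d : Int, 2 ≤ d → d < i → ¬ d ∣ n) : n.toNat.Prime := by
  rw [Nat.prime_def_le_sqrt]
  refine ⟨by omega, fun d hd2 hdsq hddvd => ?_⟩
  have hdd : d * d ≤ n.toNat := Nat.le_sqrt.mp hdsq
  have hdd1 : ((d * d : ℕ) : Int) ≤ ((n.toNat : ℕ) : Int) := Int.ofNat_le.mpr hdd
  push_cast at hdd1
  rw [show ((n.toNat : ℕ) : Int) = n by omega] at hdd1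
  have hdlt : (d : Int) < i := by
    by_contra hge
    push Not at hge
    have : i * i ≤ (d : Int) * d :=
      mul_le_mul hge hge (by omega) (by exact_mod_cast Nat.zero_le d)
    omega
  refine H d (by exact_mod_cast hd2) hdlt ?_
  have : (d : Int) ∣ (n.toNat : Int) := Int.natCast_dvd_natCast.mpr hddvd
  rwa [show ((n.toNat : Int)) = n by omega] at this

-- B's trial-division loop, characterised by primality
theorem pipTrial_eq (n : Int) (hn : 3 ≤ n) (hodd : ¬ (2:Int) ∣ n) :
    ∀ (fuel : ℕ) (i : Int), 3 ≤ i → n < i + 2 * fuel → i % 2 = 1 →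
      (∀ d : Int, 2 ≤ d → d < i → ¬ d ∣ n) →
      pipTrial fuel n i = if n.toNat.Prime then n * n else n := by
  intro fuel
  induction fuel with
  | zero =>
    intro i hi hf hiodd H
    have hii : i ≤ i * i := le_mul_of_one_le_left (by omega) (by omega)
    have h : ¬ i * i ≤ n := by omega
    rw [pipTrial, if_pos (pip_prime n i hn hi h H)]
  | succ fuel ih =>
    intro i hi hf hiodd H
    rw [pipTrial]
    by_cases h : i * i ≤ n
    · rw [if_pos h]
      by_cases hdvd : PySem.Int.mod n i = 0
      · -- i*i ≤ n and i ∣ n: composite, return n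
        rw [if_pos (by simpa using hdvd)]
        have hidvd : i ∣ n := (PySem.Int.mod_eq_zero_iff_dvd n i).mp hdvd
        have hin : i < n := by nlinarith
        have : ¬ n.toNat.Prime := by
          intro hp
          have : i.toNat ∣ n.toNat := by
            have : (i.toNat : Int) ∣ (n.toNat : Int) := by
              rwa [show (i.toNat : Int) = i by omega, show (n.toNat : Int) = n by omega]
            exact_mod_cast this
          rcases (Nat.Prime.eq_one_or_self_of_dvd hp _ this) with h1 | h1 <;> omega
        rw [if_neg this]
      · -- i does not divide n: advance to i+2
        rw [if_neg (by simpa using hdvd)]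
        apply ih (i + 2) (by omega) (by omega) (by omega)
        intro d hd2 hdlt hddvd
        rcases lt_or_ge d i with hlt | hge
        · exact H d hd2 hlt hddvd
        · rcases eq_or_lt_of_le hge with heq | hgt
          · exact hdvd ((PySem.Int.mod_eq_zero_iff_dvd n i).mpr (heq ▸ hddvd))
          · have : d = i + 1 := by omega
            subst this
            have : (2:Int) ∣ (i+1) := by omega
            exact hodd (dvd_trans this hddvd)
    · -- i*i > n: no divisor up to sqrt n, so n is prime
      rw [if_neg h, if_pos (pip_prime n i hn hi h H)]

-- B's value, characterised by primality of n
theorem power_if_prime_alt_eq (n : Int) :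
    power_if_prime_alt n = if 2 ≤ n ∧ n.toNat.Prime then n ^ 2 else n := by
  unfold power_if_prime_alt
  by_cases h1 : n < 2
  · rw [if_pos h1, if_neg (by omega)]
  · rw [if_neg h1]
    by_cases h2 : (2:Int) ∣ n
    · rw [if_pos (by simp [h2])]
      by_cases h3 : n = 2
      · subst h3; decide
      · rw [if_neg (by simpa using h3)]
        have : ¬ n.toNat.Prime := by
          intro hp
          have : (2:ℕ) ∣ n.toNat := by
            have : (2:Int) ∣ (n.toNat : Int) := by rwa [show ((n.toNat:Int)) = n by omega]
            exact_mod_cast this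
          rcases Nat.Prime.eq_one_or_self_of_dvd hp 2 this with h | h <;> omega
        rw [if_neg (fun hc => this hc.2)]
    · rw [if_neg (by simp [h2])]
      rw [pipTrial_eq n (by omega) h2 n.toNat 3 (by omega) (by omega) (by decide)
        (fun d hd2 hdlt hddvd => by
          have : d = 2 := by omega
          subst this; exact h2 hddvd)]
      by_cases hp : n.toNat.Prime
      · rw [if_pos hp, if_pos ⟨by omega, hp⟩]; ring
      · rw [if_neg hp, if_neg (fun hc => hp hc.2)]

-- ===== VERDICT (by name: the statement is the Claim_ definition above) =====
theorem power_if_prime_spec : Claim_equal_power_if_prime := by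
  intro n _
  unfold Spec_power_if_prime
  rw [power_if_prime_eq, power_if_prime_alt_eq]
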